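-- pv_equiv track=rewrite | github.com/manelbertran-arch/CLONNECT | backend/core/dm/phases/generation.py | _truncate_if_looping
-- ===== SOURCE A (Python) =====
-- def _truncate_if_looping(text: str) -> tuple[bool, str]:
--     """Detect and truncate character-level repetition loops.
--
--     Returns (was_degenerate, cleaned_text).
--     """
--     if len(text) < 20:
--         return False, text
--
--     MIN_SUB = 10
--     lower = text.lower()
--     n = len(lower)
--
--     # Cap scan start at 30 to avoid false positives on mid-sentence repetitions
--     scan_limit = min(30, n - MIN_SUB)
--     for start in range(scan_limit):
--         sub = lower[start:start + MIN_SUB]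
--         pos = lower.find(sub, start + MIN_SUB)
--         if pos != -1:
--             trunc = text[:pos].rstrip(" ,!?¡¿")
--             if len(trunc) >= 3:
--                 return True, trunc
--
--     return False, text
-- ===== SOURCE B (Python) =====
-- def _window_index(lower):
--     """Map each 10-char window of `lower` to its (ascending) start positions."""
--     index = {}
--     for i in range(len(lower) - 9):
--         index.setdefault(lower[i:i + 10], []).append(i)
--     return index
--
--
-- def _truncate_if_looping(text: str) -> tuple[bool, str]:
--     """Detect and truncate character-level repetition loops via a window index.
--
--     Returns (was_degenerate, cleaned_text).
--     """
--     if len(text) < 20: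
--         return False, text
--
--     lower = text.lower()
--     index = _window_index(lower)
--     for start in range(min(30, len(lower) - 10)):
--         pos = next((p for p in index[lower[start:start + 10]] if p >= start + 10), None)
--         if pos is not None:
--             trunc = text[:pos].rstrip(" ,!?\u00a1\u00bf")
--             if len(trunc) >= 3:
--                 return True, trunc
--
--     return False, text
-- ===== Notes on version B (the rewrite author's own statement) =====
-- stated objective: alternative
-- what changed: Replaces the per-start str.find scan with a window->positions dictionary built in one pass over the string, from which each of the up-to-30 starts takes the first recorded position >= start+10.
import Mathlib
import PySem

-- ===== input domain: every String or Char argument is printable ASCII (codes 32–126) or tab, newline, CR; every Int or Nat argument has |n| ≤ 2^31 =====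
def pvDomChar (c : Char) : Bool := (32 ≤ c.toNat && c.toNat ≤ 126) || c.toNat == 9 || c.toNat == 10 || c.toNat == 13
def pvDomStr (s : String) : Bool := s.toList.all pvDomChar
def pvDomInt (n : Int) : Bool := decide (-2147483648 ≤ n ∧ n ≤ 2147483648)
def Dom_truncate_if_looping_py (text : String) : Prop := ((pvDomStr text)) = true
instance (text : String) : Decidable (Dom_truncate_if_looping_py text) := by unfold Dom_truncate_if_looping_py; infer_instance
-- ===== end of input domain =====

-- B replaces the per-start `str.find` scan by a window→positions index built in one pass,
-- looked up per start (objective: alternative; return values proved identical on Dom).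

-- hand port of `s.rstrip(" ,!?¡¿")` (str.rstrip with a chars argument, which PySem does not
-- provide): drop trailing characters belonging to the set — exact for any chars set.
def pyRstripChars (cs strip : List Char) : List Char :=
  (cs.reverse.dropWhile (fun c => strip.contains c)).reverse

def pvStripSet : List Char := [' ', ',', '!', '?', '¡', '¿']

-- ===== PORT A =====
-- the `for start in range(scan_limit)` loop with its early returns (none = fell through)
def pvALoop (t l : List Char) : List Nat → Option (List Char)
  | [] => none
  | s :: rest =>
      let sub := PySem.List.slice l (some (s : Int)) (some ((s : Int) + 10))
      let pos := PySem.Chars.findFrom l sub ((s : Int) + 10) none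
      if pos ≠ -1 then
        let trunc := pyRstripChars (PySem.List.slice t none (some pos)) pvStripSet
        if 3 ≤ trunc.length then some trunc else pvALoop t l rest
      else pvALoop t l rest

def truncate_if_looping_py (text : String) : Bool × String :=
  let t := text.toList
  if t.length < 20 then (false, text)
  else
    let l := PySem.Chars.lower t
    let n := l.length
    let scan_limit := min 30 (n - 10)
    match pvALoop t l (List.range scan_limit) with
    | some trunc => (true, String.ofList trunc)
    | none => (false, text)

-- ===== PORT B =====
-- _window_index: index.setdefault(lower[i:i+10], []).append(i) over i in range(len(lower) - 9)
def pvWindowIndex (l : List Char) : PySem.Dict (List Char) (List Int) :=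
  (List.range (l.length - 9)).foldl
    (fun d (i : Nat) =>
      d.modify (PySem.List.slice l (some (i : Int)) (some ((i : Int) + 10))) []
        (fun ps => ps ++ [(i : Int)]))
    PySem.Dict.empty

-- the scan loop: look the window up in the index, take the first recorded position ≥ start+10
def pvBLoop (t l : List Char) (idx : PySem.Dict (List Char) (List Int)) :
    List Nat → Option (List Char)
  | [] => none
  | s :: rest =>
      let sub := PySem.List.slice l (some (s : Int)) (some ((s : Int) + 10))
      let positions := idx.getD sub []
      match positions.find? (fun p => decide ((s : Int) + 10 ≤ p)) with
      | some pos =>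
          let trunc := pyRstripChars (PySem.List.slice t none (some pos)) pvStripSet
          if 3 ≤ trunc.length then some trunc else pvBLoop t l idx rest
      | none => pvBLoop t l idx rest

def truncate_if_looping_py_alt (text : String) : Bool × String :=
  let t := text.toList
  if t.length < 20 then (false, text)
  else
    let l := PySem.Chars.lower t
    let idx := pvWindowIndex l
    match pvBLoop t l idx (List.range (min 30 (l.length - 10))) with
    | some trunc => (true, String.ofList trunc)
    | none => (false, text)

-- ===== PRECONDITION & SPEC =====
def Spec_truncate_if_looping_py (text : String) (out : Bool × String) : Prop := out = truncate_if_looping_py_alt text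
instance (text : String) (out : Bool × String) : Decidable (Spec_truncate_if_looping_py text out) := by unfold Spec_truncate_if_looping_py; infer_instance

-- ===== CLAIM (what is proved, stated in full; the proofs are below) =====
def Claim_equal_truncate_if_looping_py : Prop := ∀ (text : String), Dom_truncate_if_looping_py text → Spec_truncate_if_looping_py text (truncate_if_looping_py text)

-- ===== LEMMAS AND PROOFS =====

-- the index maps a window w to exactly the (ascending) positions whose window equals w
theorem pvWindowIndex_getD (l : List Char) (w : List Char) :
    (pvWindowIndex l).getD w []
      = (((List.range (l.length - 9)).filter
            (fun i => decide ((l.drop i).take 10 = w))).map (fun (i : Nat) => (i : Int))) := by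
  unfold pvWindowIndex
  generalize l.length - 9 = m
  induction m with
  | zero => simp [PySem.Dict.getD_empty]
  | succ m ih =>
      rw [List.range_succ, List.foldl_append, List.filter_append, List.map_append]
      simp only [List.foldl_cons, List.foldl_nil]
      have hc : ((m : Int) + 10) = ((m + 10 : Nat) : Int) := by push_cast; ring
      rw [hc, PySem.List.slice_natCast, show m + 10 - m = 10 from by omega,
        PySem.Dict.getD_modify]
      by_cases h : (l.drop m).take 10 = w
      · simp [h, ih]
      · rw [if_neg (fun hh => h hh.symm)]
        simp [h, ih]

theorem pv_find_ge_sorted (xs : List Nat) (q : Nat → Bool)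
    (hs : xs.Pairwise (· < ·)) (j : Nat)
    (hj : j ∈ xs) (hqj : q j = true) (hmin : ∀ i ∈ xs, q i = true → j ≤ i) :
    xs.find? q = some j := by
  induction xs with
  | nil => cases hj
  | cons x rest ih =>
      rw [List.mem_cons] at hj
      by_cases hx : q x = true
      · have hjx : j ≤ x := hmin x (by simp) hx
        have hxe : j = x := by
          rcases hj with he | he
          · exact he
          · exact absurd ((List.pairwise_cons.mp hs).1 j he) (by omega)

        subst hxe
        exact List.find?_cons_of_pos hx
      · have hxj : x ≠ j := fun h => hx (h ▸ hqj)
        rw [List.find?_cons_of_neg hx]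
        exact ih (List.pairwise_cons.mp hs).2 (hj.resolve_left (fun hh => hxj hh.symm))
          (fun i hi hqi => hmin i (by simp [hi]) hqi)

-- per-start agreement: the first indexed position ≥ start+10 is exactly str.find's result
theorem pv_lookup_eq_find (l : List Char) (s : Nat) (hs : s + 10 ≤ l.length) :
    ((pvWindowIndex l).getD (PySem.List.slice l (some (s : Int)) (some ((s : Int) + 10))) []).find?
        (fun p => decide ((s : Int) + 10 ≤ p))
      = (if PySem.Chars.findFrom l (PySem.List.slice l (some (s : Int)) (some ((s : Int) + 10))) ((s : Int) + 10) none = -1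
         then none
         else some (PySem.Chars.findFrom l (PySem.List.slice l (some (s : Int)) (some ((s : Int) + 10))) ((s : Int) + 10) none)) := by
  have hcast : ((s : Int) + 10) = ((s + 10 : Nat) : Int) := by push_cast; ring
  rw [hcast, PySem.List.slice_natCast]
  have htt : s + 10 - s = 10 := by omega
  rw [htt]
  set w := (l.drop s).take 10 with hw
  have hwlen : w.length = 10 := by
    simp [hw, List.length_take, List.length_drop]; omega
  rw [pvWindowIndex_getD]
  -- window-equality at i ↔ w is a prefix of l.drop i
  have hwin : ∀ i : Nat, ((l.drop i).take 10 = w) ↔ w <+: l.drop i := by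
    intro i
    constructor
    · intro h; rw [← h]; exact List.take_prefix _ _
    · intro h
      have := List.prefix_iff_eq_take.mp h
      rw [hwlen] at this; exact this.symm
  -- any prefix position fits in the index range
  have hpos_lt : ∀ i : Nat, w <+: l.drop i → i < l.length - 9 := by
    intro i h
    have := h.length_le
    rw [hwlen, List.length_drop] at this; omega
  rw [List.find?_map]
  by_cases hf : PySem.Chars.findFrom l w ((s + 10 : Nat) : Int) none = -1
  · rw [if_pos hf]
    have hni : ¬ w <:+: l.drop (s + 10) :=
      (PySem.Chars.findFrom_natCast_eq_neg_one_iff l w (s + 10) (by omega)).mp hf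
    rw [Option.map_eq_none_iff, List.find?_eq_none]
    intro i hi hqi
    simp only [List.mem_filter, List.mem_range, decide_eq_true_eq] at hi
    have hpre : w <+: l.drop i := (hwin i).mp hi.2
    have hki : s + 10 ≤ i := by
      simp only [Function.comp_apply, decide_eq_true_eq] at hqi
      exact_mod_cast hqi
    apply hni
    have : l.drop i = (l.drop (s + 10)).drop (i - (s + 10)) := by
      rw [List.drop_drop]; congr 1; omega
    rw [this] at hpre
    exact hpre.isInfix.trans ((l.drop (s + 10)).drop_suffix _).isInfix
  · rw [if_neg hf]
    obtain ⟨hge, hpre, hmin⟩ := PySem.Chars.findFrom_natCast_spec l w (s + 10) (by omega) hf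
    set r := PySem.Chars.findFrom l w ((s + 10 : Nat) : Int) none with hr
    have hr0 : (0 : Int) ≤ r := le_trans (by positivity) hge
    have hfind : (((List.range (l.length - 9)).filter
        (fun i => decide ((l.drop i).take 10 = w))).find?
        ((fun p => decide (((s + 10 : Nat) : Int) ≤ p)) ∘ (fun (i : Nat) => (i : Int))))
        = some r.toNat := by
      apply pv_find_ge_sorted
      · exact List.pairwise_lt_range.filter _
      · rw [List.mem_filter, List.mem_range]
        exact ⟨hpos_lt _ hpre, decide_eq_true ((hwin _).mpr hpre)⟩
      · simp only [Function.comp_apply, decide_eq_true_eq]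
        rw [Int.toNat_of_nonneg hr0]
        exact hge
      · intro i hi hqi
        rw [List.mem_filter, List.mem_range] at hi
        simp only [Function.comp_apply, decide_eq_true_eq] at hqi
        have hki : s + 10 ≤ i := by exact_mod_cast hqi
        by_contra hlt
        exact hmin i hki (by omega) ((hwin i).mp (of_decide_eq_true hi.2))
    rw [hfind]
    simp [Int.toNat_of_nonneg hr0]

theorem pvLoop_eq (t l : List Char) (starts : List Nat)
    (hb : ∀ s ∈ starts, s + 10 ≤ l.length) :
    pvALoop t l starts = pvBLoop t l (pvWindowIndex l) starts := by
  induction starts with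
  | nil => rfl
  | cons s rest ih =>
      have hs : s + 10 ≤ l.length := hb s (by simp)
      have ih' := ih (fun x hx => hb x (by simp [hx]))
      rw [pvALoop, pvBLoop, pv_lookup_eq_find l s hs]
      by_cases hf : PySem.Chars.findFrom l (PySem.List.slice l (some (s : Int)) (some ((s : Int) + 10))) ((s : Int) + 10) none = -1
      · simp [hf, ih']
      · rw [if_neg hf, if_pos hf]
        split
        · next pos heq =>
          cases Option.some.inj heq
          simp [ih']
        · next heq => simp at heq

-- ===== VERDICT (by name: the statement is the Claim_ definition above) =====
theorem truncate_if_looping_py_spec : Claim_equal_truncate_if_looping_py := by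
  intro text _
  unfold Spec_truncate_if_looping_py truncate_if_looping_py truncate_if_looping_py_alt
  by_cases hlen : text.length < 20
  · simp [hlen]
  · have hrw := pvLoop_eq text.toList (PySem.Chars.lower text.toList)
        (List.range (min 30 ((PySem.Chars.lower text.toList).length - 10)))
        (by intro s hsm; rw [List.mem_range] at hsm; omega)
    simp [hlen, hrw]
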